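-- pv_equiv track=rewrite | github.com/rtlnl/ictwithindustry2019 | Detect_infoboxes/yellowbox.py | get_box_data
-- ===== SOURCE A (Python) =====
-- def get_box_data(counts, threshold=200):
--     "Extract the top and the bottom of the box."
--     selection = [(height, count) for height, count in counts.items() if count >= threshold]
--     if len(selection) > 0:
--         top = min(height for height,count in selection)
--         bottom = max(height for height,count in selection)
--         amount_yellow = sum(count for height,count in selection)
--     else:
--         top = bottom = None
--         amount_yellow = 0
--     return top, bottom, amount_yellow
-- ===== SOURCE B (Python) =====
-- def get_box_data(counts, threshold=200):
--     "Extract the top and the bottom of the box."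
--     top = None
--     bottom = None
--     amount_yellow = 0
--     for height, count in counts.items():
--         if count >= threshold:
--             if top is None or height < top:
--                 top = height
--             if bottom is None or height > bottom:
--                 bottom = height
--             amount_yellow += count
--     return top, bottom, amount_yellow
-- ===== Notes on version B (the rewrite author's own statement) =====
-- stated objective: simpler
-- what changed: Replaced the filtered intermediate list plus three separate reductions (min, max, sum, each re-scanning the selection) with one single pass over counts.items() maintaining top/bottom/amount accumulators; the empty-selection result falls out of the initial accumulators instead of a length test.
import Mathlib
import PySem

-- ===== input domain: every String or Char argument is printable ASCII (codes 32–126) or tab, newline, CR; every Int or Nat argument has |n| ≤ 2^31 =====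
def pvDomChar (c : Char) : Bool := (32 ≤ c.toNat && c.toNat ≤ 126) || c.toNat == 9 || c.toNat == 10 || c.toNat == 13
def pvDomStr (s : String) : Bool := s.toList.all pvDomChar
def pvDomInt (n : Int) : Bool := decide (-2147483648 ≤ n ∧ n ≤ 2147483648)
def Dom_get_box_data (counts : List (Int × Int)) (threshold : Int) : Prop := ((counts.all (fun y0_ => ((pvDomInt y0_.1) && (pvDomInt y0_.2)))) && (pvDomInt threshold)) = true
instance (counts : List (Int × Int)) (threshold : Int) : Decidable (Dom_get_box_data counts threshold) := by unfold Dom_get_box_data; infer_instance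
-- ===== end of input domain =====

-- B builds the result in one pass over counts.items() with top/bottom/amount accumulators
-- instead of A's filtered intermediate list followed by three separate reductions.

-- ===== PORT A =====
def get_box_data (counts : List (Int × Int)) (threshold : Int) : Option Int × Option Int × Int :=
  let selection := counts.filter (fun hc => threshold ≤ hc.2)
  if selection.length > 0 then
    (PySem.List.min? (selection.map (fun hc => hc.1)) (fun y => y),
     PySem.List.max? (selection.map (fun hc => hc.1)) (fun y => y),
     (selection.map (fun hc => hc.2)).sum)
  else (none, none, 0)

-- ===== PORT B =====
-- 'if top is None or height < top: top = height'
def pvUpdTop (o : Option Int) (h : Int) : Option Int :=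
  match o with
  | none => some h
  | some t => if h < t then some h else some t

-- 'if bottom is None or height > bottom: bottom = height'
def pvUpdBottom (o : Option Int) (h : Int) : Option Int :=
  match o with
  | none => some h
  | some b => if b < h then some h else some b

def get_box_data_alt (counts : List (Int × Int)) (threshold : Int) : Option Int × Option Int × Int :=
  counts.foldl
    (fun st hc =>
      if threshold ≤ hc.2 then
        (pvUpdTop st.1 hc.1, pvUpdBottom st.2.1 hc.1, st.2.2 + hc.2)
      else st)
    (none, none, 0)

-- ===== PRECONDITION & SPEC =====
def Spec_get_box_data (counts : List (Int × Int)) (threshold : Int) (out : Option Int × Option Int × Int) : Prop := out = get_box_data_alt counts threshold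
instance (counts : List (Int × Int)) (threshold : Int) (out : Option Int × Option Int × Int) : Decidable (Spec_get_box_data counts threshold out) := by unfold Spec_get_box_data; infer_instance

-- ===== CLAIM (what is proved, stated in full; the proofs are below) =====
def Claim_equal_get_box_data : Prop := ∀ (counts : List (Int × Int)) (threshold : Int), Dom_get_box_data counts threshold → Spec_get_box_data counts threshold (get_box_data counts threshold)

-- ===== LEMMAS AND PROOFS =====

theorem pvUpdTop_eq_min (a h : Int) : pvUpdTop (some a) h = some (min a h) := by
  simp only [pvUpdTop]; split_ifs <;> simp_all; omega

theorem pvUpdBottom_eq_max (a h : Int) : pvUpdBottom (some a) h = some (max a h) := by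
  simp only [pvUpdBottom]; split_ifs <;> simp_all; omega

-- the B fold, started from a some/some state, is the running min / running max / sum over the selection
theorem fold_from_some (threshold : Int) (l : List (Int × Int)) (a b s : Int) :
    l.foldl
      (fun st hc =>
        if threshold ≤ hc.2 then
          (pvUpdTop st.1 hc.1, pvUpdBottom st.2.1 hc.1, st.2.2 + hc.2)
        else st)
      (some a, some b, s)
    = (some (((l.filter (fun hc => threshold ≤ hc.2)).map (fun hc => hc.1)).foldl min a),
       some (((l.filter (fun hc => threshold ≤ hc.2)).map (fun hc => hc.1)).foldl max b),
       s + ((l.filter (fun hc => threshold ≤ hc.2)).map (fun hc => hc.2)).sum) := by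
  induction l generalizing a b s with
  | nil => simp
  | cons x t ih =>
    by_cases hx : threshold ≤ x.2
    · simp only [List.foldl_cons, List.filter_cons, hx, if_pos, decide_true,
        pvUpdTop_eq_min, pvUpdBottom_eq_max, ih, List.map_cons, List.sum_cons,
        Prod.mk.injEq]
      exact ⟨trivial, trivial, by ring⟩
    · simp only [List.foldl_cons, List.filter_cons, hx, decide_false]
      exact ih a b s

theorem get_box_data_unfold (counts : List (Int × Int)) (threshold : Int) :
    get_box_data counts threshold = get_box_data_alt counts threshold := by
  unfold get_box_data get_box_data_alt
  cases hsel : counts.filter (fun hc => threshold ≤ hc.2) with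
  | nil =>
    simp only [List.length_nil, gt_iff_lt, lt_self_iff_false, if_false]
    induction counts with
      | nil => simp
      | cons x t ih =>
        have hx : ¬ threshold ≤ x.2 := by
          by_contra h
          have := hsel
          simp [h] at this
        have ht : t.filter (fun hc => threshold ≤ hc.2) = [] := by
          have := hsel
          simpa [List.filter_cons, hx] using this
        simp only [List.foldl_cons, if_neg hx]
        exact ih ht
  | cons y tsel =>
    -- selection nonempty: find the first matching element of counts and use fold_from_some
    induction counts with
    | nil => simp at hsel
    | cons x t ih =>
      by_cases hx : threshold ≤ x.2
      · have hsel' : y = x ∧ tsel = t.filter (fun hc => threshold ≤ hc.2) := by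
          have := hsel
          simp [hx] at this
          exact ⟨this.1.symm, this.2.symm⟩
        obtain ⟨hy, hts⟩ := hsel'
        simp only [List.foldl_cons, if_pos hx,
          show pvUpdTop none x.1 = some x.1 from rfl,
          show pvUpdBottom none x.1 = some x.1 from rfl]
        rw [fold_from_some]
        simp [hy, hts, PySem.List.min?_id_cons, PySem.List.max?_id_cons]
      · have hsel2 : t.filter (fun hc => threshold ≤ hc.2) = y :: tsel := by
          have := hsel
          simpa [List.filter_cons, hx] using this
        have h2 := ih hsel2
        simpa [hsel, hsel2, List.foldl_cons, if_neg hx] using h2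

-- ===== VERDICT (by name: the statement is the Claim_ definition above) =====
theorem get_box_data_spec : Claim_equal_get_box_data := by
  intro counts threshold _
  unfold Spec_get_box_data
  exact get_box_data_unfold counts threshold
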